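-- pv_equiv track=rewrite | github.com/Gregobena/trabajo-practico-2 | src/funciones.py | es_ascii
-- ===== SOURCE A (Python) =====
-- import string
--
-- numeros = string.digits
--
-- def es_ascii (cadena):
--     ok = True
--     letras = string.ascii_letters
--     for caracter in cadena:
--         if (caracter in numeros) or (caracter in letras):
--             continue
--         else:
--             ok = False
--             break
--     return ok
-- ===== SOURCE B (Python) =====
-- import string
--
-- def es_ascii(cadena):
--     # Trim alphanumeric characters from both ends; the string is fully
--     # alphanumeric iff nothing is left after stripping.
--     alnum = string.ascii_letters + string.digits
--     return cadena.strip(alnum) == ''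
-- ===== Notes on version B (the rewrite author's own statement) =====
-- stated objective: alternative
-- what changed: Replaces A's explicit per-character loop with ok flag and early break by str.strip with the alphanumeric alphabet: trim allowed characters from both ends and test whether the remainder is the empty string (any disallowed character survives the two-sided trim).
import Mathlib
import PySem

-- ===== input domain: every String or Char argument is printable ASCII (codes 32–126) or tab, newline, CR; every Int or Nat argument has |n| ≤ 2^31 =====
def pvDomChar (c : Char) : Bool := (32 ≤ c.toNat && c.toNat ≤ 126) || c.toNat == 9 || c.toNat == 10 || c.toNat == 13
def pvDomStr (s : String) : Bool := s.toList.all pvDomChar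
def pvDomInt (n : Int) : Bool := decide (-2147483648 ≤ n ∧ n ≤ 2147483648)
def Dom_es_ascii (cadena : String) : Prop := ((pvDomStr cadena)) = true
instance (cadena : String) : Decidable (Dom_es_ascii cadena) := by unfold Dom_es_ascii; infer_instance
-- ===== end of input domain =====

-- B replaces A's per-character loop with ok flag and early break by a two-sided
-- str.strip over the alphanumeric alphabet followed by an emptiness test (alternative).

-- ===== PORT A =====
-- string.digits
def pvNumeros : List Char := "0123456789".toList
-- string.ascii_letters
def pvLetras : List Char := "abcdefghijklmnopqrstuvwxyzABCDEFGHIJKLMNOPQRSTUVWXYZ".toList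

-- the for-loop: on an allowed char continue, otherwise ok = False and break
def esAsciiLoop : List Char → Bool → Bool
  | [], ok => ok
  | c :: rest, ok =>
      if pvNumeros.contains c || pvLetras.contains c then esAsciiLoop rest ok
      else false

def es_ascii (cadena : String) : Bool := esAsciiLoop cadena.toList true

-- ===== PORT B =====
-- alnum = string.ascii_letters + string.digits
def pvAlnum : List Char := pvLetras ++ pvNumeros

-- str.strip(chars): exact — removes from both ends the longest runs of
-- characters contained in the given set (Python's strip with an argument)
def pyStripChars (cs chars : List Char) : List Char :=
  ((cs.dropWhile chars.contains).reverse.dropWhile chars.contains).reverse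

-- cadena.strip(alnum) == ''
def es_ascii_alt (cadena : String) : Bool :=
  pyStripChars cadena.toList pvAlnum == []

-- ===== PRECONDITION & SPEC =====
def Spec_es_ascii (cadena : String) (out : Bool) : Prop := out = es_ascii_alt cadena
instance (cadena : String) (out : Bool) : Decidable (Spec_es_ascii cadena out) := by unfold Spec_es_ascii; infer_instance

-- ===== CLAIM (what is proved, stated in full; the proofs are below) =====
def Claim_equal_es_ascii : Prop := ∀ (cadena : String), Dom_es_ascii cadena → Spec_es_ascii cadena (es_ascii cadena)

-- ===== LEMMAS AND PROOFS =====

-- A's loop (started with ok = true) is true iff every character is allowed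
theorem esAsciiLoop_eq_all (cs : List Char) :
    esAsciiLoop cs true = cs.all (fun c => pvNumeros.contains c || pvLetras.contains c) := by
  induction cs with
  | nil => rfl
  | cons c rest ih =>
      simp only [esAsciiLoop, List.all_cons]
      split_ifs with h
      · rw [h, Bool.true_and]; exact ih
      · have hf : (pvNumeros.contains c || pvLetras.contains c) = false := by simpa using h
        rw [hf, Bool.false_and]

-- the two allowed-character tests agree pointwise
theorem contains_alnum_iff (c : Char) :
    pvAlnum.contains c = (pvNumeros.contains c || pvLetras.contains c) := by
  simp [pvAlnum, Bool.or_comm]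

-- everything surviving a dropWhile satisfies the predicate iff everything did
theorem forall_dropWhile_iff {α : Type} (p : α → Bool) (l : List α) :
    (∀ x ∈ l.dropWhile p, p x = true) ↔ (∀ x ∈ l, p x = true) := by
  induction l with
  | nil => simp
  | cons c rest ih =>
      by_cases h : p c = true
      · simpa [List.dropWhile_cons, h] using ih
      · simp [List.dropWhile_cons, h]

-- the two-sided strip is empty iff every character is in the set
theorem pyStripChars_eq_nil_iff (cs chars : List Char) :
    pyStripChars cs chars = [] ↔ ∀ x ∈ cs, chars.contains x = true := by
  unfold pyStripChars
  rw [List.reverse_eq_nil_iff, List.dropWhile_eq_nil_iff]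
  constructor
  · intro h x hx
    exact (forall_dropWhile_iff _ cs).1 (fun y hy => h y (List.mem_reverse.2 hy)) x hx
  · intro h x hx
    exact (forall_dropWhile_iff _ cs).2 h x ((List.mem_reverse.1 hx))

-- ===== VERDICT (by name: the statement is the Claim_ definition above) =====
theorem es_ascii_spec : Claim_equal_es_ascii := by
  intro cadena _
  unfold Spec_es_ascii es_ascii es_ascii_alt
  rw [esAsciiLoop_eq_all, Bool.eq_iff_iff, beq_iff_eq, pyStripChars_eq_nil_iff,
      List.all_eq_true]
  constructor
  · intro h x hx; rw [contains_alnum_iff]; exact h x hx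
  · intro h x hx; rw [← contains_alnum_iff]; exact h x hx
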